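-- pv_equiv track=rewrite | github.com/Vhydie/Intelligent-Decision-Support-System | apps/home/main_function.py | electronic_waste
-- ===== SOURCE A (Python) =====
-- def electronic_waste(df, year):
--     count_comp, count_server, count_telp, count_av, count_imaging, count_network = 0, 0, 0, 0, 0, 0
--     for data in df:
--         if data[1] == "Komputer" and data[0] <= year-7:
--             count_comp += data[3]
--         elif data[1] == "Server" and data[0] <= year-10:
--             count_server += data[3]
--         elif data[1] == "Telepon" and data[0] <= year-4:
--             count_telp += data[3]
--         elif data[1] == "Audio Visual" and data[0] <= year-5:
--             count_av += data[3]
--         elif data[1] == "Pemrosesan Gambar" and data[0] <= year-5: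
--             count_imaging += data[3]
--         elif data[1] == "Jaringan" and data[0] <= year-5:
--             count_network += data[3]
--     result = [count_comp, count_server, count_telp, count_av, count_imaging, count_network]
--     return result, sum(result)
-- ===== SOURCE B (Python) =====
-- CATS = [("Komputer", 7), ("Server", 10), ("Telepon", 4),
--         ("Audio Visual", 5), ("Pemrosesan Gambar", 5), ("Jaringan", 5)]
--
-- def electronic_waste(df, year):
--     result = [sum(d[3] for d in df if d[1] == cat and d[0] <= year - off)
--               for cat, off in CATS]
--     return result, sum(result)
-- ===== Notes on version B (the rewrite author's own statement) =====
-- stated objective: idiomatic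
-- what changed: Replaces the single pass with six mutable counters and an if/elif chain by a per-category filter-and-sum over a fixed (category, age-offset) table, so the result list is built directly by a comprehension.
import Mathlib
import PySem

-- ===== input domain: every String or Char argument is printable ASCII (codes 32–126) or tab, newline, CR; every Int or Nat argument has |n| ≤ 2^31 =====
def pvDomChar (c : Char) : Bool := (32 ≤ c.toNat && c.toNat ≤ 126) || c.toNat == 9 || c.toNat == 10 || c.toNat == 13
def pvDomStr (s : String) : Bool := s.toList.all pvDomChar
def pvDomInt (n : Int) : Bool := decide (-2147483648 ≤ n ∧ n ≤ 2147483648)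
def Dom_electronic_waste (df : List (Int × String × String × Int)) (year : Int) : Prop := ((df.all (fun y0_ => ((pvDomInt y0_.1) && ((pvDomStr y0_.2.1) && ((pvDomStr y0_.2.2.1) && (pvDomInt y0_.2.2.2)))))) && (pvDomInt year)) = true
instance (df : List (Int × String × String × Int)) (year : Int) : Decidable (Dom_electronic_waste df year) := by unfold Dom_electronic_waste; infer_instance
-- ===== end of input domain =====

-- B replaces A's single pass with six counters by a per-category filter-and-sum over a fixed table (idiomatic; not claimed faster).
-- ===== PORT A =====
def ewLoop (df : List (Int × String × String × Int)) (year : Int)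
    (c s t a i n : Int) : Int × Int × Int × Int × Int × Int :=
  match df with
  | [] => (c, s, t, a, i, n)
  | d :: rest =>
    if d.2.1 == "Komputer" && decide (d.1 ≤ year - 7) then
      ewLoop rest year (c + d.2.2.2) s t a i n
    else if d.2.1 == "Server" && decide (d.1 ≤ year - 10) then
      ewLoop rest year c (s + d.2.2.2) t a i n
    else if d.2.1 == "Telepon" && decide (d.1 ≤ year - 4) then
      ewLoop rest year c s (t + d.2.2.2) a i n
    else if d.2.1 == "Audio Visual" && decide (d.1 ≤ year - 5) then
      ewLoop rest year c s t (a + d.2.2.2) i n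
    else if d.2.1 == "Pemrosesan Gambar" && decide (d.1 ≤ year - 5) then
      ewLoop rest year c s t a (i + d.2.2.2) n
    else if d.2.1 == "Jaringan" && decide (d.1 ≤ year - 5) then
      ewLoop rest year c s t a i (n + d.2.2.2)
    else
      ewLoop rest year c s t a i n

def electronic_waste (df : List (Int × String × String × Int)) (year : Int) : List Int × Int :=
  let (c, s, t, a, i, n) := ewLoop df year 0 0 0 0 0 0
  let result : List Int := [c, s, t, a, i, n]
  (result, result.sum)

-- ===== PORT B =====
def ewCats : List (String × Int) :=
  [("Komputer", 7), ("Server", 10), ("Telepon", 4),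
   ("Audio Visual", 5), ("Pemrosesan Gambar", 5), ("Jaringan", 5)]

def ewCatSum (df : List (Int × String × String × Int)) (year : Int)
    (cat : String) (off : Int) : Int :=
  ((df.filter (fun d => d.2.1 == cat && decide (d.1 ≤ year - off))).map
    (fun d => d.2.2.2)).sum

def electronic_waste_alt (df : List (Int × String × String × Int)) (year : Int) : List Int × Int :=
  let result := ewCats.map (fun co => ewCatSum df year co.1 co.2)
  (result, result.sum)

-- ===== PRECONDITION & SPEC =====
def Spec_electronic_waste (df : List (Int × String × String × Int)) (year : Int) (out : List Int × Int) : Prop := out = electronic_waste_alt df year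
instance (df : List (Int × String × String × Int)) (year : Int) (out : List Int × Int) : Decidable (Spec_electronic_waste df year out) := by unfold Spec_electronic_waste; infer_instance

-- ===== CLAIM (what is proved, stated in full; the proofs are below) =====
def Claim_equal_electronic_waste : Prop := ∀ (df : List (Int × String × String × Int)) (year : Int), Dom_electronic_waste df year → Spec_electronic_waste df year (electronic_waste df year)

-- ===== LEMMAS AND PROOFS =====

-- ===== VERDICT (by name: the statement is the Claim_ definition above) =====
theorem ewCatSum_cons' (d : Int × String × String × Int)
    (rest : List (Int × String × String × Int)) (year : Int) (cat : String) (off : Int) :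
    ewCatSum (d :: rest) year cat off =
      (if d.2.1 = cat ∧ d.1 ≤ year - off then d.2.2.2 else 0) + ewCatSum rest year cat off := by
  simp only [ewCatSum, List.filter_cons]
  by_cases h : d.2.1 = cat ∧ d.1 ≤ year - off
  · simp [h.1, h.2]
  · rw [if_neg h]
    have : (d.2.1 == cat && decide (d.1 ≤ year - off)) = false := by
      rcases not_and_or.mp h with h' | h' <;> simp [h']
    simp [this]

theorem ewLoop_eq (df : List (Int × String × String × Int)) (year : Int)
    (c s t a i n : Int) :
    ewLoop df year c s t a i n =
      (c + ewCatSum df year "Komputer" 7,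
       s + ewCatSum df year "Server" 10,
       t + ewCatSum df year "Telepon" 4,
       a + ewCatSum df year "Audio Visual" 5,
       i + ewCatSum df year "Pemrosesan Gambar" 5,
       n + ewCatSum df year "Jaringan" 5) := by
  induction df generalizing c s t a i n with
  | nil => simp [ewLoop, ewCatSum]
  | cons d rest ih =>
    simp only [ewLoop]
    split_ifs <;>
      simp only [Bool.and_eq_true, beq_iff_eq, decide_eq_true_eq] at * <;>
      rw [ih] <;>
      simp only [ewCatSum_cons', Prod.mk.injEq] <;>
      refine ⟨?_, ?_, ?_, ?_, ?_, ?_⟩ <;>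
      split_ifs
    all_goals try ring
    all_goals
      rename_i hA hB
      first
        | exact absurd hB hA
        | exact absurd hA hB
        | exact absurd (hA.1.symm.trans hB.1) (by decide)

theorem electronic_waste_spec : Claim_equal_electronic_waste := by
  intro df year _
  show electronic_waste df year = electronic_waste_alt df year
  simp [electronic_waste, electronic_waste_alt, ewLoop_eq, ewCats]
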